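-- pv_equiv track=rewrite | github.com/raold/second-brain | scripts/validate_naming_conventions.py | _suggest_script_names
-- ===== SOURCE A (Python) =====
-- from typing import Dict, List, Optional, Set, Tuple
--
-- def _suggest_script_names(filename: str) -> List[str]:
--     """Suggest valid script names."""
--     suggestions = []
--     base_name = filename.replace('.py', '').replace('-', '_').lower()
--
--     # Try to categorize based on content/name
--     if any(word in base_name for word in ['test', 'check', 'validate']):
--         suggestions.append(f"util_{base_name}.py")
--     elif any(word in base_name for word in ['deploy', 'release']):
--         suggestions.append(f"cd_{base_name}.py")
--     elif any(word in base_name for word in ['build', 'ci']):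
--         suggestions.append(f"ci_{base_name}.py")
--     else:
--         suggestions.extend([
--             f"util_{base_name}.py",
--             f"dev_{base_name}.py",
--             f"maint_{base_name}.py"
--         ])
--
--     return suggestions[:3]
-- ===== SOURCE B (Python) =====
-- KEYWORDS = [("test", 0), ("check", 0), ("validate", 0),
--             ("deploy", 1), ("release", 1),
--             ("build", 2), ("ci", 2)]
-- PREFIXES = ["util", "cd", "ci"]
--
-- def _suggest_script_names(filename):
--     """Suggest valid script names."""
--     base_name = filename.replace('.py', '').replace('-', '_').lower()
--     # Single sliding-window pass over the text: mark which categories match anywhere.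
--     hit = [False, False, False]
--     for i in range(len(base_name)):
--         for kw, cat in KEYWORDS:
--             if base_name.startswith(kw, i):
--                 hit[cat] = True
--     for cat, prefix in enumerate(PREFIXES):
--         if hit[cat]:
--             return [f"{prefix}_{base_name}.py"]
--     return [f"util_{base_name}.py", f"dev_{base_name}.py", f"maint_{base_name}.py"]
-- ===== Notes on version B (the rewrite author's own statement) =====
-- stated objective: alternative
-- what changed: Replaced the keyword-driven if/elif chain of substring membership tests by a text-driven sliding-window scan: one pass over the positions of base_name marks in a boolean hit table which of the three categories has a keyword starting there, and the answer is the first hit category (or the three defaults).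
import Mathlib
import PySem

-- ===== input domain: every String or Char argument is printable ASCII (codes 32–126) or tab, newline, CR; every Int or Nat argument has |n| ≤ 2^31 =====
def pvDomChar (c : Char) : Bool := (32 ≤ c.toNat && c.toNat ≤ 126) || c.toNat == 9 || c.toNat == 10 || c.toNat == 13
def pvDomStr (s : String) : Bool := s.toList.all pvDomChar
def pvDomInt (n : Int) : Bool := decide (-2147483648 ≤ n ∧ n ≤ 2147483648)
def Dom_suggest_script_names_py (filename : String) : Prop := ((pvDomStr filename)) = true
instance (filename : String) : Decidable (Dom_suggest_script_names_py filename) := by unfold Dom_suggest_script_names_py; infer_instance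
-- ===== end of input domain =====

-- B replaces A's keyword-driven if/elif membership chain by a text-driven sliding-window scan filling a category hit table (alternative algorithm, same cost).


-- ===== PORT A =====
def suggest_script_names_py (filename : String) : List String :=
  let base_name := PySem.Str.lower (PySem.Str.replace (PySem.Str.replace filename ".py" "") "-" "_")
  let suggestions : List String :=
    if (["test", "check", "validate"].any (fun word => PySem.Str.isIn word base_name)) then
      ["util_" ++ base_name ++ ".py"]
    else if (["deploy", "release"].any (fun word => PySem.Str.isIn word base_name)) then
      ["cd_" ++ base_name ++ ".py"]
    else if (["build", "ci"].any (fun word => PySem.Str.isIn word base_name)) then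
      ["ci_" ++ base_name ++ ".py"]
    else
      ["util_" ++ base_name ++ ".py", "dev_" ++ base_name ++ ".py", "maint_" ++ base_name ++ ".py"]
  PySem.List.slice suggestions none (some 3)

-- ===== PORT B =====
def pvKeywords : List (String × Nat) :=
  [("test", 0), ("check", 0), ("validate", 0),
   ("deploy", 1), ("release", 1),
   ("build", 2), ("ci", 2)]

-- final selection loop: 'for cat, prefix in enumerate(PREFIXES): if hit[cat]: return [...]'
def pvSelect (base_name : String) (hit : List Bool) : List (Nat × String) → List String
  | [] => ["util_" ++ base_name ++ ".py", "dev_" ++ base_name ++ ".py", "maint_" ++ base_name ++ ".py"]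
  | (cat, pre) :: rest =>
      if hit.getD cat false then [pre ++ "_" ++ base_name ++ ".py"]
      else pvSelect base_name hit rest

def suggest_script_names_py_alt (filename : String) : List String :=
  let base_name := PySem.Str.lower (PySem.Str.replace (PySem.Str.replace filename ".py" "") "-" "_")
  let cs := base_name.toList
  -- base_name.startswith(kw, i) for 0 ≤ i < len is exactly 'kw prefix of cs.drop i' on code points
  let hit := (List.range cs.length).foldl
    (fun hit i =>
      pvKeywords.foldl
        (fun h kwc =>
          if PySem.Chars.startswith (cs.drop i) kwc.1.toList then h.set kwc.2 true else h)
        hit)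
    [false, false, false]
  pvSelect base_name hit [(0, "util"), (1, "cd"), (2, "ci")]

-- ===== PRECONDITION & SPEC =====
def Spec_suggest_script_names_py (filename : String) (out : List String) : Prop := out = suggest_script_names_py_alt filename
instance (filename : String) (out : List String) : Decidable (Spec_suggest_script_names_py filename out) := by unfold Spec_suggest_script_names_py; infer_instance

-- ===== CLAIM (what is proved, stated in full; the proofs are below) =====
def Claim_equal_suggest_script_names_py : Prop := ∀ (filename : String), Dom_suggest_script_names_py filename → Spec_suggest_script_names_py filename (suggest_script_names_py filename)

-- ===== LEMMAS AND PROOFS =====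
def pvM0 (t : List Char) : Bool :=
  PySem.Chars.startswith t "test".toList || PySem.Chars.startswith t "check".toList || PySem.Chars.startswith t "validate".toList
def pvM1 (t : List Char) : Bool :=
  PySem.Chars.startswith t "deploy".toList || PySem.Chars.startswith t "release".toList
def pvM2 (t : List Char) : Bool :=
  PySem.Chars.startswith t "build".toList || PySem.Chars.startswith t "ci".toList

set_option maxHeartbeats 1000000 in
theorem pv_inner_eq (t : List Char) (a b c : Bool) :
    pvKeywords.foldl
      (fun h kwc => if PySem.Chars.startswith t kwc.1.toList then h.set kwc.2 true else h)
      [a, b, c]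
    = [a || pvM0 t, b || pvM1 t, c || pvM2 t] := by
  simp only [pvKeywords, List.foldl, pvM0, pvM1, pvM2]
  split_ifs <;> simp_all

theorem pv_outer_eq (cs : List Char) (L : List Nat) (a b c : Bool) :
    L.foldl
      (fun hit i =>
        pvKeywords.foldl
          (fun h kwc => if PySem.Chars.startswith (cs.drop i) kwc.1.toList then h.set kwc.2 true else h)
          hit)
      [a, b, c]
    = [a || L.any (fun i => pvM0 (cs.drop i)),
       b || L.any (fun i => pvM1 (cs.drop i)),
       c || L.any (fun i => pvM2 (cs.drop i))] := by
  induction L generalizing a b c with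
  | nil => simp
  | cons i L ih =>
      simp only [List.foldl_cons, pv_inner_eq, ih, List.any_cons]
      simp [Bool.or_assoc]

theorem pv_any_range (cs kw : List Char) (hkw : kw ≠ []) :
    (List.range cs.length).any (fun i => PySem.Chars.startswith (cs.drop i) kw)
    = PySem.Chars.isIn kw cs := by
  cases hb : PySem.Chars.isIn kw cs with
  | true =>
      obtain ⟨j, hj⟩ := (PySem.Chars.exists_prefix_drop_iff_isIn (s := cs) (sub := kw)).mpr hb
      have hjlen : j < cs.length := by
        by_contra h
        have : List.drop j cs = [] := List.drop_eq_nil_of_le (by omega)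
        rw [this] at hj
        exact hkw (List.prefix_nil.mp hj)
      simp only [List.any_eq_true, List.mem_range]
      refine ⟨j, hjlen, ?_⟩
      rw [PySem.Chars.startswith_iff]
      exact hj
  | false =>
      simp only [List.any_eq_false, List.mem_range]
      intro i _ hstart
      rw [PySem.Chars.startswith_iff] at hstart
      have := (PySem.Chars.exists_prefix_drop_iff_isIn (s := cs) (sub := kw)).mp ⟨i, hstart⟩
      simp [this] at hb

theorem pv_any_range_test (cs : List Char) :
    (List.range cs.length).any (fun i => PySem.Chars.startswith (cs.drop i) "test".toList)
    = PySem.Chars.isIn "test".toList cs :=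
  pv_any_range cs _ (by decide)

theorem pv_any_range_check (cs : List Char) :
    (List.range cs.length).any (fun i => PySem.Chars.startswith (cs.drop i) "check".toList)
    = PySem.Chars.isIn "check".toList cs :=
  pv_any_range cs _ (by decide)

theorem pv_any_range_validate (cs : List Char) :
    (List.range cs.length).any (fun i => PySem.Chars.startswith (cs.drop i) "validate".toList)
    = PySem.Chars.isIn "validate".toList cs :=
  pv_any_range cs _ (by decide)

theorem pv_any_range_deploy (cs : List Char) :
    (List.range cs.length).any (fun i => PySem.Chars.startswith (cs.drop i) "deploy".toList)
    = PySem.Chars.isIn "deploy".toList cs :=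
  pv_any_range cs _ (by decide)

theorem pv_any_range_release (cs : List Char) :
    (List.range cs.length).any (fun i => PySem.Chars.startswith (cs.drop i) "release".toList)
    = PySem.Chars.isIn "release".toList cs :=
  pv_any_range cs _ (by decide)

theorem pv_any_range_build (cs : List Char) :
    (List.range cs.length).any (fun i => PySem.Chars.startswith (cs.drop i) "build".toList)
    = PySem.Chars.isIn "build".toList cs :=
  pv_any_range cs _ (by decide)

theorem pv_any_range_ci (cs : List Char) :
    (List.range cs.length).any (fun i => PySem.Chars.startswith (cs.drop i) "ci".toList)
    = PySem.Chars.isIn "ci".toList cs :=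
  pv_any_range cs _ (by decide)

theorem pv_any_orb {α : Type} (L : List α) (f g : α → Bool) :
    L.any (fun x => f x || g x) = (L.any f || L.any g) := by
  induction L with
  | nil => simp
  | cons x L ih => simp [List.any_cons, ih]; ac_rfl

theorem pv_str_isIn (w s : String) :
    PySem.Str.isIn w s = PySem.Chars.isIn w.toList s.toList := by
  cases hb : PySem.Chars.isIn w.toList s.toList with
  | true =>
      exact (PySem.Str.isIn_iff_infix w s).mpr ((PySem.Chars.isIn_iff_infix _ _).mp hb)
  | false =>
      cases hs : PySem.Str.isIn w s with
      | false => rfl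
      | true =>
          have := (PySem.Str.isIn_iff_infix w s).mp hs
          rw [(PySem.Chars.isIn_iff_infix _ _).mpr this] at hb
          exact hb.symm ▸ rfl

-- ===== VERDICT (by name: the statement is the Claim_ definition above) =====
theorem suggest_script_names_py_spec : Claim_equal_suggest_script_names_py := by
  intro filename _
  show suggest_script_names_py filename = suggest_script_names_py_alt filename
  unfold suggest_script_names_py suggest_script_names_py_alt
  simp only [pv_outer_eq, pvM0, pvM1, pvM2, pv_any_orb, pv_any_range_test, pv_any_range_check,
    pv_any_range_validate, pv_any_range_deploy, pv_any_range_release,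
    pv_any_range_build, pv_any_range_ci,
    Bool.false_or, pvSelect, List.getD, List.getElem?_cons_zero, List.getElem?_cons_succ,
    Option.getD_some, List.any_cons, List.any_nil,
    pv_str_isIn, Bool.or_false, Bool.or_assoc]
  have h0 : ("util" : String) ++ "_" = "util_" := rfl
  have h1 : ("cd" : String) ++ "_" = "cd_" := rfl
  have h2 : ("ci" : String) ++ "_" = "ci_" := rfl
  split_ifs <;> simp_all [PySem.List.slice_to, h0, h1, h2, String.append_assoc]
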